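-- pv_equiv track=rewrite | github.com/kirillbk/yandex-algorithm-training | 2B/5/e.py | solution
-- ===== SOURCE A (Python) =====
-- def solution(a, b, c, s):
-- 	c_dict = dict()
-- 	for k in range(len(c)):
-- 		c_k = c[k]
-- 		if c_k not in c_dict:
-- 			c_dict[c_k] = k
-- 	for i in range(len(a)):
-- 		for j in range(len(b)):
-- 			c_k = s - (a[i] + b[j])
-- 			k = c_dict.get(c_k, -1)
-- 			if k != -1:
-- 				return i, j, k
-- 	return -1,
-- ===== SOURCE B (Python) =====
-- def solution(a, b, c, s):
--     # Precompute every pair sum b[j]+c[k] -> first (j,k) in (j,k)-lex order,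
--     # then a single scan over a; the i,j double loop of A disappears.
--     bc = {}
--     for j, y in enumerate(b):
--         for k, z in enumerate(c):
--             t = y + z
--             if t not in bc:
--                 bc[t] = (j, k)
--     for i, x in enumerate(a):
--         p = bc.get(s - x)
--         if p is not None:
--             return (i, p[0], p[1])
--     return (-1,)
-- ===== Notes on version B (the rewrite author's own statement) =====
-- stated objective: alternative
-- what changed: Instead of A's dict over c and a nested i,j scan, B precomputes a dict of all pair sums b[j]+c[k] -> first (j,k) in (j,k)-lex order and then makes a single pass over a looking up s-a[i]; the i,j double loop disappears.
import Mathlib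
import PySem

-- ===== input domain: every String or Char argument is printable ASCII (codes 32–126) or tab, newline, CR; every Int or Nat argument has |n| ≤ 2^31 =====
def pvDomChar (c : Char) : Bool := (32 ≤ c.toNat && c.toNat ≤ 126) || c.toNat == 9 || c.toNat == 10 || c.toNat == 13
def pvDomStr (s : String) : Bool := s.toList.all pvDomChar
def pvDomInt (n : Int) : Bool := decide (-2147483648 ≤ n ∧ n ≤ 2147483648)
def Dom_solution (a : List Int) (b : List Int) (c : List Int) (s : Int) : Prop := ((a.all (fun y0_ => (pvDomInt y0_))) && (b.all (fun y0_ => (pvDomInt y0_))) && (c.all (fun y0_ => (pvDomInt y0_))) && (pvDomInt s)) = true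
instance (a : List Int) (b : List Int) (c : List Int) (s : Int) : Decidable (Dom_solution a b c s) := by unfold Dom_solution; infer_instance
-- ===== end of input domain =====

-- B replaces A's dict-over-c plus nested i,j scan with a precomputed dict of all pair sums b[j]+c[k] -> first (j,k) and a single pass over a (alternative structure; not claimed faster).


-- ===== PORT A =====
-- first loop: build c_dict (first index of each value of c)
def buildCDict (c : List Int) : PySem.Dict Int Int :=
  (PySem.List.pyRange 0 c.length 1).foldl
    (fun d k =>
      let ck := PySem.List.pyGetD c k 0   -- c[k], in range for k ∈ range(len(c))
      if d.contains ck then d else d.insert ck k)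
    PySem.Dict.empty

-- inner 'for j in range(len(b))' with early return
def loopJA (d : PySem.Dict Int Int) (b : List Int) (s ai i : Int) : List Int → Option (List Int)
  | [] => none
  | j :: js =>
    let ck := s - (ai + PySem.List.pyGetD b j 0)
    let k := d.getD ck (-1)
    if k ≠ -1 then some [i, j, k] else loopJA d b s ai i js

-- outer 'for i in range(len(a))'
def loopIA (d : PySem.Dict Int Int) (a b : List Int) (s : Int) : List Int → Option (List Int)
  | [] => none
  | i :: is =>
    match loopJA d b s (PySem.List.pyGetD a i 0) i (PySem.List.pyRange 0 b.length 1) with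
    | some r => some r
    | none => loopIA d a b s is

def solution (a : List Int) (b : List Int) (c : List Int) (s : Int) : List Int :=
  let d := buildCDict c
  match loopIA d a b s (PySem.List.pyRange 0 a.length 1) with
  | some r => r
  | none => [-1]

-- ===== PORT B =====
-- inner 'for k, z in enumerate(c)': insert pair sum y+z -> (j,k) if absent
def rowFoldB (y j : Int) : List Int → Int → PySem.Dict Int (Int × Int) → PySem.Dict Int (Int × Int)
  | [], _, d => d
  | z :: zs, k, d =>
    rowFoldB y j zs (k + 1) (if d.contains (y + z) then d else d.insert (y + z) (j, k))

-- outer 'for j, y in enumerate(b)'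
def bcFoldB (c : List Int) : List Int → Int → PySem.Dict Int (Int × Int) → PySem.Dict Int (Int × Int)
  | [], _, d => d
  | y :: ys, j, d => bcFoldB c ys (j + 1) (rowFoldB y j c 0 d)

-- 'for i, x in enumerate(a)': single lookup pass
def lookupLoopB (bc : PySem.Dict Int (Int × Int)) (s : Int) : List Int → Int → Option (List Int)
  | [], _ => none
  | x :: xs, i =>
    match bc.get? (s - x) with
    | some p => some [i, p.1, p.2]
    | none => lookupLoopB bc s xs (i + 1)

def solution_alt (a : List Int) (b : List Int) (c : List Int) (s : Int) : List Int :=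
  let bc := bcFoldB c b 0 PySem.Dict.empty
  match lookupLoopB bc s a 0 with
  | some r => r
  | none => [-1]

-- ===== PRECONDITION & SPEC =====
def Spec_solution (a : List Int) (b : List Int) (c : List Int) (s : Int) (out : List Int) : Prop := out = solution_alt a b c s
instance (a : List Int) (b : List Int) (c : List Int) (s : Int) (out : List Int) : Decidable (Spec_solution a b c s out) := by unfold Spec_solution; infer_instance

-- ===== CLAIM (what is proved, stated in full; the proofs are below) =====
def Claim_equal_solution : Prop := ∀ (a : List Int) (b : List Int) (c : List Int) (s : Int), Dom_solution a b c s → Spec_solution a b c s (solution a b c s)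

-- ===== LEMMAS AND PROOFS =====

-- spec helper: first index ≥ k (counted from k) of t in zs
def findK (t : Int) (k : Int) : List Int → Option Int
  | [] => none
  | z :: zs => if z = t then some k else findK t (k + 1) zs

-- spec helper: first (j,k) with y_j + c_k = t, scanning ys with counter j, k minimal per row
def findJK (t : Int) (c : List Int) : List Int → Int → Option (Int × Int)
  | [], _ => none
  | y :: ys, j =>
    match findK (t - y) 0 c with
    | some k => some (j, k)
    | none => findJK t c ys (j + 1)

theorem findK_append (t z : Int) : ∀ (zs : List Int) (k : Int),
    findK t k (zs ++ [z]) = (findK t k zs).orElse (fun _ => if z = t then some (k + zs.length) else none) := by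
  intro zs
  induction zs with
  | nil => intro k; simp [findK]
  | cons w ws ih =>
    intro k
    simp only [List.cons_append, findK]
    by_cases h : w = t
    · simp [h]
    · simp only [if_neg h, ih, List.length_cons, Nat.cast_add, Nat.cast_one]
      have harg : k + 1 + (ws.length : Int) = k + ((ws.length : Int) + 1) := by ring
      rw [harg]

theorem findK_ge (t : Int) : ∀ (zs : List Int) (k0 k : Int), findK t k0 zs = some k → k0 ≤ k := by
  intro zs
  induction zs with
  | nil => intro k0 k h; simp [findK] at h
  | cons w ws ih =>
    intro k0 k h
    simp only [findK] at h
    by_cases hw : w = t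
    · simp [hw] at h; omega
    · simp only [if_neg hw] at h
      have := ih (k0 + 1) k h
      omega

-- the dict built by A's first loop answers exactly as a linear first-occurrence scan of c
theorem buildCDict_get? (c : List Int) : ∀ (t : Int),
    (buildCDict c).get? t = findK t 0 c := by
  induction c using List.reverseRecOn with
  | nil => intro t; simp [buildCDict, findK, PySem.List.pyRange_one_eq_nil, PySem.Dict.get?_empty]
  | append_singleton cs z ih =>
    intro t
    have hsplit : PySem.List.pyRange 0 ((cs ++ [z]).length) 1
        = PySem.List.pyRange 0 cs.length 1 ++ [(cs.length : Int)] := by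
      simp only [List.length_append, List.length_cons, List.length_nil]
      push_cast
      rw [PySem.List.pyRange_one_succ_right (by positivity)]
    have hstep : buildCDict (cs ++ [z]) =
        (let d := buildCDict cs; if d.contains z then d else d.insert z cs.length) := by
      unfold buildCDict
      rw [hsplit, List.foldl_append]
      have hpref : (PySem.List.pyRange 0 cs.length 1).foldl
          (fun d k => let ck := PySem.List.pyGetD (cs ++ [z]) k 0;
            if d.contains ck then d else d.insert ck k) PySem.Dict.empty
          = (PySem.List.pyRange 0 cs.length 1).foldl
          (fun d k => let ck := PySem.List.pyGetD cs k 0;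
            if d.contains ck then d else d.insert ck k) PySem.Dict.empty := by
        apply PySem.List.foldl_congr_mem
        intro d k hk
        have hk' := (PySem.List.mem_pyRange_one).mp hk
        have : PySem.List.pyGetD (cs ++ [z]) k 0 = PySem.List.pyGetD cs k 0 := by
          rw [PySem.List.pyGetD_eq_getElem (cs ++ [z]) 0 (by omega) (by simp; omega),
              PySem.List.pyGetD_eq_getElem cs 0 (by omega) (by omega)]
          rw [List.getElem_append_left (by omega)]
        simp only [this]
      rw [hpref]
      simp only [List.foldl_cons, List.foldl_nil]
      have hz : PySem.List.pyGetD (cs ++ [z]) (cs.length : Int) 0 = z := by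
        rw [PySem.List.pyGetD_natCast]
        simp [List.getD_eq_getElem?_getD]
      simp only [hz]
    rw [hstep, findK_append]
    simp only
    by_cases hc : (buildCDict cs).contains z
    · rw [if_pos hc]
      have hsome : (findK z 0 cs).isSome := by
        rw [← ih z]; rw [PySem.Dict.contains_eq_isSome_get?] at hc; exact hc
      rw [ih t]
      by_cases ht : z = t
      · subst ht
        obtain ⟨k, hk⟩ := Option.isSome_iff_exists.mp hsome
        simp [hk]
      · cases h : findK t 0 cs <;> simp [ht]
    · rw [if_neg hc]
      have hnone : findK z 0 cs = none := by
        rw [← ih z]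
        rwa [PySem.Dict.contains_eq_isSome_get?, Bool.not_eq_true, Option.isSome_eq_false_iff,
          Option.isNone_iff_eq_none] at hc
      by_cases ht : t = z
      · subst ht
        rw [PySem.Dict.get?_insert_self, hnone]
        simp
      · rw [PySem.Dict.get?_insert_of_ne _ _ ht, ih t]
        cases h : findK t 0 cs <;> simp [Ne.symm ht]

theorem buildCDict_getD (c : List Int) (t : Int) :
    (buildCDict c).getD t (-1) = (findK t 0 c).getD (-1) := by
  rw [PySem.Dict.getD_eq_get?_getD, buildCDict_get? c t]

-- B's inner row fold answers: previous answer, else first k in this row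
theorem rowFoldB_get? (y j t : Int) : ∀ (zs : List Int) (k : Int) (d : PySem.Dict Int (Int × Int)),
    (rowFoldB y j zs k d).get? t
      = (d.get? t).orElse (fun _ => (findK (t - y) k zs).map (fun kk => (j, kk))) := by
  intro zs
  induction zs with
  | nil => intro k d; simp [rowFoldB, findK]
  | cons z zs' ih =>
    intro k d
    simp only [rowFoldB, findK]
    by_cases hz : z = t - y
    · have hty : t = y + z := by omega
      by_cases hc : d.contains (y + z)
      · rw [if_pos hc, ih]
        have : (d.get? t).isSome := by
          rw [PySem.Dict.contains_eq_isSome_get?] at hc; rw [hty]; exact hc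
        obtain ⟨v, hv⟩ := Option.isSome_iff_exists.mp this
        simp [hv, hz]
      · rw [if_neg hc, ih]
        have hd : d.get? t = none := by
          rw [PySem.Dict.contains_eq_isSome_get?, Bool.not_eq_true, Option.isSome_eq_false_iff,
            Option.isNone_iff_eq_none] at hc
          rw [hty]; exact hc
        have hins : (d.insert (y + z) (j, k)).get? t = some (j, k) := by
          rw [hty]; exact PySem.Dict.get?_insert_self _ _ _
        simp only [hins, hd, if_pos hz]; rfl
    · have hty : t ≠ y + z := by omega
      by_cases hc : d.contains (y + z)
      · rw [if_pos hc, ih, if_neg hz]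
      · rw [if_neg hc, ih, PySem.Dict.get?_insert_of_ne _ _ hty, if_neg hz]

-- B's whole dict answers: previous answer, else first (j,k) over remaining rows
theorem bcFoldB_get? (c : List Int) (t : Int) : ∀ (ys : List Int) (j : Int) (d : PySem.Dict Int (Int × Int)),
    (bcFoldB c ys j d).get? t = (d.get? t).orElse (fun _ => findJK t c ys j) := by
  intro ys
  induction ys with
  | nil => intro j d; simp [bcFoldB, findJK]
  | cons y ys' ih =>
    intro j d
    simp only [bcFoldB, findJK]
    rw [ih, rowFoldB_get?]
    cases hd : d.get? t with
    | some v => simp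
    | none =>
      cases hf : findK (t - y) 0 c <;> simp [Option.orElse]

-- A's j-loop over range(len(b)) computes exactly findJK of the remaining rows
theorem loopJA_findJK (b c : List Int) (s x i : Int) : ∀ (n j0 : ℕ), j0 + n = b.length →
    loopJA (buildCDict c) b s x i (PySem.List.pyRange (j0 : Int) (b.length : Int) 1)
      = (findJK (s - x) c (b.drop j0) (j0 : Int)).map (fun p => [i, p.1, p.2]) := by
  intro n
  induction n with
  | zero =>
    intro j0 h
    rw [PySem.List.pyRange_one_eq_nil (by omega), List.drop_of_length_le (by omega)]
    simp [loopJA, findJK]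
  | succ m ih =>
    intro j0 h
    have hlt : j0 < b.length := by omega
    rw [PySem.List.pyRange_one_cons (by exact_mod_cast hlt),
        List.drop_eq_getElem_cons hlt]
    simp only [loopJA, findJK]
    have hget : PySem.List.pyGetD b (j0 : Int) 0 = b[j0] := by
      rw [PySem.List.pyGetD_natCast]
      simp [List.getD_eq_getElem?_getD, List.getElem?_eq_getElem hlt]
    rw [hget, buildCDict_getD]
    have harg : s - (x + b[j0]) = s - x - b[j0] := by ring
    rw [harg]
    cases hfk : findK (s - x - b[j0]) 0 c with
    | some k =>
      have : (0 : Int) ≤ k := findK_ge _ _ _ _ hfk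
      simp only [Option.getD_some]
      rw [if_pos (by omega)]
      simp
    | none =>
      simp only [Option.getD_none]
      rw [if_neg (by omega)]
      have := ih (j0 + 1) (by omega)
      push_cast at this ⊢
      exact this

-- A's i-loop equals B's single lookup pass over a
theorem loopIA_lookup (a b c : List Int) (s : Int) : ∀ (n i0 : ℕ), i0 + n = a.length →
    loopIA (buildCDict c) a b s (PySem.List.pyRange (i0 : Int) (a.length : Int) 1)
      = lookupLoopB (bcFoldB c b 0 PySem.Dict.empty) s (a.drop i0) (i0 : Int) := by
  intro n
  induction n with
  | zero =>
    intro i0 h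
    rw [PySem.List.pyRange_one_eq_nil (by omega), List.drop_of_length_le (by omega)]
    simp [loopIA, lookupLoopB]
  | succ m ih =>
    intro i0 h
    have hlt : i0 < a.length := by omega
    rw [PySem.List.pyRange_one_cons (by exact_mod_cast hlt),
        List.drop_eq_getElem_cons hlt]
    simp only [loopIA, lookupLoopB]
    have hget : PySem.List.pyGetD a (i0 : Int) 0 = a[i0] := by
      rw [PySem.List.pyGetD_natCast]
      simp [List.getD_eq_getElem?_getD, List.getElem?_eq_getElem hlt]
    rw [hget]
    have hbc : (bcFoldB c b 0 PySem.Dict.empty).get? (s - a[i0]) = findJK (s - a[i0]) c b 0 := by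
      rw [bcFoldB_get?]
      simp [PySem.Dict.get?_empty]
    have hj := loopJA_findJK b c s a[i0] (i0 : Int) b.length 0 (by omega)
    simp only [Int.natCast_zero, List.drop_zero] at hj
    rw [hj, hbc]
    cases hf : findJK (s - a[i0]) c b 0 with
    | some p => rfl
    | none =>
      simp only [Option.map_none]
      have := ih (i0 + 1) (by omega)
      push_cast at this ⊢
      exact this

-- ===== VERDICT (by name: the statement is the Claim_ definition above) =====
theorem solution_spec : Claim_equal_solution := by
  intro a b c s _
  unfold Spec_solution solution solution_alt
  have h := loopIA_lookup a b c s a.length 0 (by omega)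
  simp only [Int.natCast_zero, List.drop_zero] at h
  show (match loopIA (buildCDict c) a b s (PySem.List.pyRange 0 a.length 1) with
        | some r => r | none => [-1])
      = (match lookupLoopB (bcFoldB c b 0 PySem.Dict.empty) s a 0 with | some r => r | none => [-1])
  rw [h]
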